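-- pv_equiv track=rewrite | github.com/VedantS5/Text-Based-Pdf-Data-Extraction | 02_markdown.py | aggregate_author_results
-- ===== SOURCE A (Python) =====
-- from typing import List, Dict, Set, Tuple, Any, Optional
--
-- def aggregate_author_results(chunk_results: List[List[Dict]]) -> List[Dict]:
--     """
--     Combine author results from multiple chunks, removing duplicates.
--     Authors are considered duplicates if they share the same name.
--     When duplicates are found, we keep the most complete version of the author data.
--     """
--     authors_by_name = {}
--
--     # Process all chunks
--     for authors in chunk_results:
--         for author in authors:
--             name = author.get('name', '').strip()
--             if not name:
--                 continue
--
--             # If we haven't seen this author before, add them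
--             if name not in authors_by_name:
--                 authors_by_name[name] = author.copy()
--             else:
--                 # If we've seen this author, merge data, preferring non-empty values
--                 existing = authors_by_name[name]
--                 for field in ['title', 'email']:
--                     if not existing.get(field) and author.get(field):
--                         existing[field] = author.get(field)
--
--     # Convert back to list
--     return list(authors_by_name.values())
-- ===== SOURCE B (Python) =====
-- def aggregate_author_results(chunk_results):
--     # Two-pass: group authors by stripped name first, then reduce each group.
--     groups = {}
--     for author in (a for chunk in chunk_results for a in chunk):
--         name = author.get('name', '').strip()
--         if name:
--             groups.setdefault(name, []).append(author)
--
--     merged_list = []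
--     for group in groups.values():
--         merged = group[0].copy()
--         for author in group[1:]:
--             for field in ('title', 'email'):
--                 if not merged.get(field) and author.get(field):
--                     merged[field] = author.get(field)
--         merged_list.append(merged)
--     return merged_list
-- ===== Notes on version B (the rewrite author's own statement) =====
-- stated objective: alternative
-- what changed: Replaces A's single-pass merge-as-you-go dict with a two-pass decomposition: first group authors by stripped name in first-seen order, then reduce each group to one merged dict by folding the field-fill step over the group's tail.
import Mathlib
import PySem

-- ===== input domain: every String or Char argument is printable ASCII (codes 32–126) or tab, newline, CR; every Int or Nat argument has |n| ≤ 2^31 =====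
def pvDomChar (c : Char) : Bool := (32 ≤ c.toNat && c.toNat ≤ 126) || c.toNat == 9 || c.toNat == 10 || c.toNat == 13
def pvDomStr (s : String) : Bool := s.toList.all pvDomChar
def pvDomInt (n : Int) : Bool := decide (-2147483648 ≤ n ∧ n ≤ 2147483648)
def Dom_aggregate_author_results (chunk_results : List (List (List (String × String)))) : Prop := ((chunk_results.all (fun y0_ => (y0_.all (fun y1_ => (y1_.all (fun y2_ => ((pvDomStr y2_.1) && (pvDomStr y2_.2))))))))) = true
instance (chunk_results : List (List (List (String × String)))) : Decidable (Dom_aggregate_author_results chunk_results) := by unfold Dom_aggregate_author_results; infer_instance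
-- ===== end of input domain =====

-- B is an alternative two-pass decomposition (group by name, then reduce each group); same cost,
-- same return value; neither program mutates its input.

-- shared helper: the field-fill loop `for field in ('title','email'): if not merged.get(field)
-- and author.get(field): merged[field] = author.get(field)` (textually identical in A and B)
def pvFill (merged author : PySem.Dict String String) : PySem.Dict String String :=
  ["title", "email"].foldl (fun merged field =>
    if merged.getD field "" = "" ∧ ¬ author.getD field "" = "" then
      merged.insert field (author.getD field "")
    else merged) merged

-- ===== PORT A =====
-- body of A's inner loop `for author in authors: …`
def pvStepA (abn : PySem.Dict String (PySem.Dict String String))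
    (author : List (String × String)) : PySem.Dict String (PySem.Dict String String) :=
  if PySem.Str.strip ((PySem.Dict.mk author).getD "name" "") = "" then abn
  else if abn.contains (PySem.Str.strip ((PySem.Dict.mk author).getD "name" "")) = false then
    -- authors_by_name[name] = author.copy()
    abn.insert (PySem.Str.strip ((PySem.Dict.mk author).getD "name" "")) (PySem.Dict.mk author)
  else  -- merge into existing, preferring non-empty values
    abn.insert (PySem.Str.strip ((PySem.Dict.mk author).getD "name" ""))
      (pvFill (abn.getD (PySem.Str.strip ((PySem.Dict.mk author).getD "name" "")) PySem.Dict.empty) (PySem.Dict.mk author))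

def aggregate_author_results (chunk_results : List (List (List (String × String)))) : List (List (String × String)) :=
  let authors_by_name :=
    chunk_results.foldl (fun abn authors => authors.foldl pvStepA abn) PySem.Dict.empty
  authors_by_name.values.map PySem.Dict.items

-- ===== PORT B =====
-- body of B's grouping loop: groups.setdefault(name, []).append(author)
def pvStepB (g : PySem.Dict String (List (PySem.Dict String String)))
    (author : List (String × String)) : PySem.Dict String (List (PySem.Dict String String)) :=
  if PySem.Str.strip ((PySem.Dict.mk author).getD "name" "") = "" then g
  else g.insert (PySem.Str.strip ((PySem.Dict.mk author).getD "name" ""))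
    (g.getD (PySem.Str.strip ((PySem.Dict.mk author).getD "name" "")) [] ++ [PySem.Dict.mk author])

def aggregate_author_results_alt (chunk_results : List (List (List (String × String)))) : List (List (String × String)) :=
  let groups :=
    (chunk_results.flatMap (fun chunk => chunk)).foldl pvStepB PySem.Dict.empty
  groups.values.map (fun group =>
    match group with
    | [] => []                                        -- unreachable: groups are never empty
    | merged :: rest => (rest.foldl pvFill merged).items)

-- ===== PRECONDITION & SPEC =====
def Spec_aggregate_author_results (chunk_results : List (List (List (String × String)))) (out : List (List (String × String))) : Prop := out = aggregate_author_results_alt chunk_results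
instance (chunk_results : List (List (List (String × String)))) (out : List (List (String × String))) : Decidable (Spec_aggregate_author_results chunk_results out) := by unfold Spec_aggregate_author_results; infer_instance

-- ===== CLAIM (what is proved, stated in full; the proofs are below) =====
def Claim_equal_aggregate_author_results : Prop := ∀ (chunk_results : List (List (List (String × String)))), Dom_aggregate_author_results chunk_results → Spec_aggregate_author_results chunk_results (aggregate_author_results chunk_results)

-- ===== LEMMAS AND PROOFS =====

-- reducing one group, as B does it (on the empty group it gives the empty dict)
def pvReduce : List (PySem.Dict String String) → PySem.Dict String String
  | [] => PySem.Dict.empty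
  | merged :: rest => rest.foldl pvFill merged

-- the merged dict A maintains for each name is the reduction of B's group for that name
def pvRmap (G : PySem.Dict String (List (PySem.Dict String String))) : PySem.Dict String (PySem.Dict String String) :=
  PySem.Dict.mk (G.items.map (fun p => (p.1, pvReduce p.2)))

theorem pvGet?_Rmap (G : PySem.Dict String (List (PySem.Dict String String))) (k : String) :
    (pvRmap G).get? k = (G.get? k).map pvReduce := by
  obtain ⟨l⟩ := G
  induction l with
  | nil => rfl
  | cons p rest ih =>
    obtain ⟨k0, v⟩ := p
    show (PySem.Dict.mk ((k0, pvReduce v) :: rest.map _)).get? k = _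
    rw [PySem.Dict.get?_mk_cons, PySem.Dict.get?_mk_cons]
    split
    · rfl
    · exact ih

theorem pvContains_Rmap (G : PySem.Dict String (List (PySem.Dict String String))) (k : String) :
    (pvRmap G).contains k = G.contains k := by
  rw [PySem.Dict.contains_eq_isSome_get?, PySem.Dict.contains_eq_isSome_get?, pvGet?_Rmap]
  cases G.get? k <;> rfl

theorem pvRmap_insert (G : PySem.Dict String (List (PySem.Dict String String))) (k : String)
    (g : List (PySem.Dict String String)) :
    pvRmap (G.insert k g) = (pvRmap G).insert k (pvReduce g) := by
  apply PySem.Dict.ext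
  by_cases h : G.contains k = true
  · rw [show (pvRmap (G.insert k g)).items = (G.insert k g).items.map (fun p => (p.1, pvReduce p.2)) from rfl,
      PySem.Dict.items_insert_of_contains _ _ h,
      PySem.Dict.items_insert_of_contains _ _ ((pvContains_Rmap G k).trans h),
      show (pvRmap G).items = G.items.map (fun p => (p.1, pvReduce p.2)) from rfl]
    rw [List.map_map, List.map_map]
    apply List.map_congr_left
    intro p _
    by_cases hp : (p.1 == k) = true <;> simp [Function.comp, hp]
  · rw [show (pvRmap (G.insert k g)).items = (G.insert k g).items.map (fun p => (p.1, pvReduce p.2)) from rfl,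
      PySem.Dict.items_insert_of_not_contains _ _ (by simpa using h),
      PySem.Dict.items_insert_of_not_contains _ _ (by rw [pvContains_Rmap]; simpa using h)]
    simp [pvRmap]

theorem pvReduce_append (g : List (PySem.Dict String String)) (a : PySem.Dict String String)
    (h : g ≠ []) : pvReduce (g ++ [a]) = pvFill (pvReduce g) a := by
  cases g with
  | nil => exact absurd rfl h
  | cons m rest => simp [pvReduce, List.foldl_append]

theorem pvStepB_ne (G : PySem.Dict String (List (PySem.Dict String String)))
    (author : List (String × String)) (h : ∀ p ∈ G.items, p.2 ≠ []) :
    ∀ p ∈ (pvStepB G author).items, p.2 ≠ [] := by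
  intro p hp
  unfold pvStepB at hp
  split at hp
  · exact h p hp
  · rcases (PySem.Dict.mem_items_insert _ _ _ _).1 hp with heq | ⟨hmem, _⟩
    · subst heq; simp
    · exact h p hmem

theorem pvStep_comm (G : PySem.Dict String (List (PySem.Dict String String)))
    (author : List (String × String)) (h : ∀ p ∈ G.items, p.2 ≠ []) :
    pvStepA (pvRmap G) author = pvRmap (pvStepB G author) := by
  unfold pvStepA pvStepB
  by_cases hn : PySem.Str.strip ((PySem.Dict.mk author).getD "name" "") = ""
  · rw [if_pos hn, if_pos hn]
  · rw [if_neg hn, if_neg hn, pvContains_Rmap]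
    set a := PySem.Dict.mk author with ha
    set name := PySem.Str.strip (a.getD "name" "") with hname
    by_cases hc : G.contains name = true
    · rw [if_neg (by simp [hc])]
      have hsome : (G.get? name).isSome := by rw [← PySem.Dict.contains_eq_isSome_get?, hc]
      obtain ⟨g, hg⟩ := Option.isSome_iff_exists.1 hsome
      have hgne : g ≠ [] := h (name, g) (PySem.Dict.mem_items_of_get?_eq_some G hg)
      have hgD : G.getD name [] = g := PySem.Dict.getD_of_get?_eq_some G [] hg
      rw [pvRmap_insert, hgD, pvReduce_append g a hgne]
      congr 2
      rw [PySem.Dict.getD_eq_get?_getD, pvGet?_Rmap, hg]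
      rfl
    · simp only [Bool.not_eq_true] at hc
      rw [if_pos hc, pvRmap_insert, PySem.Dict.getD_of_not_contains _ _ hc]
      rfl

theorem pvMain (xs : List (List (String × String))) :
    ∀ G : PySem.Dict String (List (PySem.Dict String String)), (∀ p ∈ G.items, p.2 ≠ []) →
    xs.foldl pvStepA (pvRmap G) = pvRmap (xs.foldl pvStepB G) := by
  induction xs with
  | nil => intro G _; rfl
  | cons author rest ih =>
    intro G h
    rw [List.foldl_cons, List.foldl_cons, pvStep_comm G author h]
    exact ih _ (pvStepB_ne G author h)

-- ===== VERDICT (by name: the statement is the Claim_ definition above) =====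
theorem aggregate_author_results_spec : Claim_equal_aggregate_author_results := by
  unfold Claim_equal_aggregate_author_results
  intro chunk_results _
  unfold Spec_aggregate_author_results aggregate_author_results aggregate_author_results_alt
  have hflat : chunk_results.flatMap (fun chunk => chunk) = chunk_results.flatten := by
    simp
  rw [hflat, show chunk_results.foldl (fun abn authors => authors.foldl pvStepA abn) PySem.Dict.empty
        = chunk_results.flatten.foldl pvStepA PySem.Dict.empty from (List.foldl_flatten).symm,
    show (PySem.Dict.empty : PySem.Dict String (PySem.Dict String String))
        = pvRmap PySem.Dict.empty from rfl,
    pvMain chunk_results.flatten PySem.Dict.empty (by intro p hp; cases hp)]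
  set Gf := chunk_results.flatten.foldl pvStepB PySem.Dict.empty
  show ((pvRmap Gf).values).map PySem.Dict.items = _
  have hv : (pvRmap Gf).values = Gf.values.map pvReduce := by
    show (Gf.items.map (fun p => (p.1, pvReduce p.2))).map Prod.snd
        = (Gf.items.map Prod.snd).map pvReduce
    rw [List.map_map, List.map_map]; rfl
  rw [hv, List.map_map]
  apply List.map_congr_left
  intro g _
  cases g <;> rfl
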